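-- pv_equiv track=rewrite | github.com/Gorgeous-Patrick/jaseci | jac/jaclang/runtimelib/data_mapper/perf_measure.py | get_num_dpu_jumps_adaptive
-- ===== SOURCE A (Python) =====
-- def get_num_dpu_jumps_adaptive(mapping: dict[int, int], set_traces: list[list[set[int]]]) -> int:
--     """Get the number of cross DPU jumps. Given the traces."""
--     paths: list[list[int]] = []
--     for set_trace in set_traces:
--         path: list[int] = []
--         dpu = -1
--         for i in range(len(set_trace)):
--             elements = set_trace[i]
--             while len(elements) > 0:
--                 dpu = mapping[next(iter(elements))]
--                 in_dpu_elements = set(s for s in set_trace[i] if mapping[s] == dpu)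
--                 path.extend(in_dpu_elements)
--                 elements = elements - in_dpu_elements
--         paths.append(path)
--     edge_set: list[tuple[int, int]] = []
--     for path in paths:
--         for i in range(len(path) - 1):
--             edge = (path[i], path[i + 1])
--             edge_set.append(edge)
--     return len([edge for edge in edge_set if mapping[edge[0]] != mapping[edge[1]]])
-- ===== SOURCE B (Python) =====
-- def get_num_dpu_jumps_adaptive(mapping: dict[int, int], set_traces: list[list[set[int]]]) -> int:
--     """Get the number of cross DPU jumps. Given the traces."""
--     jumps = 0
--     for set_trace in set_traces:
--         path: list[int] = []
--         for elements in set_trace: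
--             groups: dict[int, list[int]] = {}
--             for s in elements:
--                 groups.setdefault(mapping[s], []).append(s)
--             for grp in groups.values():
--                 path.extend(grp)
--         for x, y in zip(path, path[1:]):
--             if mapping[x] != mapping[y]:
--                 jumps += 1
--     return jumps
-- ===== Notes on version B (the rewrite author's own statement) =====
-- stated objective: simpler
-- what changed: B replaces A's nested while/set-subtraction regrouping (rescanning the set once per distinct DPU) with a single forward pass that buckets each element into an insertion-ordered dict keyed by its DPU, and counts adjacent DPU-differing pairs per trace with zip instead of materialising a global edge list.
-- outside the precondition, e.g. on get_num_dpu_jumps_adaptive({1: 1, 16: 2}, [[{16, 1}, {1}]]): A returns 1, B returns 1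
import Mathlib
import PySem

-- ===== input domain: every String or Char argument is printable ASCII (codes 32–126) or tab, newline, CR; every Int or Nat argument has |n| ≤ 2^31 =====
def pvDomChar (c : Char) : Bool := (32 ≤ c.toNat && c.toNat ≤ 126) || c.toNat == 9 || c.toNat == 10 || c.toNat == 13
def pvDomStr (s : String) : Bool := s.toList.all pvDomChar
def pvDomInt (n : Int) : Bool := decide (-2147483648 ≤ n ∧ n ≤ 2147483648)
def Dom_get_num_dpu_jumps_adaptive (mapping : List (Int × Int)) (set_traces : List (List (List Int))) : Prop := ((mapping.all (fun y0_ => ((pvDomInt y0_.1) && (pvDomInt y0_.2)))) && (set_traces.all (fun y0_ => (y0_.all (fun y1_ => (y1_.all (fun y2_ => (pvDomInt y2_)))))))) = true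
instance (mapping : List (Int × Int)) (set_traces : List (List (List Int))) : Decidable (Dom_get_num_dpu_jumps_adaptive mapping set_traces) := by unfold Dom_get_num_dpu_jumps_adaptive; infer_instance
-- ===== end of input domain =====

-- B replaces A's repeated rescan-and-subtract regrouping with one ordered-dict bucketing pass
-- per set and a per-trace zip count of adjacent DPU-differing pairs (objective: simpler).

-- ===== PORT A =====
-- mapping[s]  (total form; Pre_ restricts to inputs where every looked-up key is present)
def pvDget (mapping : List (Int × Int)) (s : Int) : Int := (PySem.Dict.mk mapping).getD s 0

-- the 'while len(elements) > 0' loop of A; fuel = the initial number of elements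
-- (each pass removes at least the element the dpu was read from, so the fuel is never exhausted)
def pvWhileA (mapping : List (Int × Int)) (orig : List Int) : Nat → List Int → List Int
  | 0, _ => []
  | _ + 1, [] => []
  | fuel + 1, h :: t =>
    let dpu := pvDget mapping h
    let in_dpu := PySem.Set.ofList (orig.filter (fun s => pvDget mapping s == dpu))
    in_dpu ++ pvWhileA mapping orig fuel (PySem.Set.diff (h :: t) in_dpu)

def get_num_dpu_jumps_adaptive (mapping : List (Int × Int)) (set_traces : List (List (List Int))) : Int :=
  let paths := set_traces.foldl (fun paths set_trace =>
    let path := set_trace.foldl (fun path elements =>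
      path ++ pvWhileA mapping elements elements.length elements) []
    paths ++ [path]) []
  let edge_set := paths.foldl (fun es path =>
    (PySem.List.pyRange 0 ((path.length : Int) - 1) 1).foldl (fun es i =>
      es ++ [(PySem.List.pyGetD path i 0, PySem.List.pyGetD path (i + 1) 0)]) es) []
  ((edge_set.filter (fun e => !(pvDget mapping e.1 == pvDget mapping e.2))).length : Int)

-- ===== PORT B =====
def get_num_dpu_jumps_adaptive_alt (mapping : List (Int × Int)) (set_traces : List (List (List Int))) : Int :=
  set_traces.foldl (fun jumps set_trace =>
    let path := set_trace.foldl (fun path elements =>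
      let groups := elements.foldl (fun g s =>
        g.modify (pvDget mapping s) [] (· ++ [s])) PySem.Dict.empty
      groups.values.foldl (fun p grp => p ++ grp) path) []
    (path.zip (path.drop 1)).foldl (fun jumps e =>
      if pvDget mapping e.1 ≠ pvDget mapping e.2 then jumps + 1 else jumps) jumps) 0

-- ===== PRECONDITION & SPEC =====
-- Pre_ excludes (a) inputs where some trace element has no key in mapping (A raises KeyError),
-- (b) inner lists with duplicates (a Python set cannot hold them), and (c) inputs whose jump
-- count depends on CPython's hash iteration order over the sets — i.e. some trace has two
-- adjacent nonempty sets that share a DPU while one of them spans several DPUs, where the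
-- boundary jump is decided by which DPU block happens to be iterated first/last.
def pvAdjOK (mapping : List (Int × Int)) (S T : List Int) : Bool :=
  let dS := PySem.Set.ofList (S.map (fun s => (PySem.Dict.mk mapping).getD s 0))
  let dT := PySem.Set.ofList (T.map (fun s => (PySem.Dict.mk mapping).getD s 0))
  (dS.length == 1 && dT.length == 1) || dS.all (fun d => !(dT.contains d))

def Pre_get_num_dpu_jumps_adaptive (mapping : List (Int × Int)) (set_traces : List (List (List Int))) : Prop :=
  ∀ tr ∈ set_traces,
    (∀ st ∈ tr, st.Nodup ∧ ∀ s ∈ st, (PySem.Dict.mk mapping).contains s = true) ∧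
    (let ns := tr.filter (fun st => !st.isEmpty)
     (ns.zip ns.tail).all (fun p => pvAdjOK mapping p.1 p.2) = true)

instance (mapping : List (Int × Int)) (set_traces : List (List (List Int))) : Decidable (Pre_get_num_dpu_jumps_adaptive mapping set_traces) := by
  unfold Pre_get_num_dpu_jumps_adaptive; infer_instance

def pvWitness_get_num_dpu_jumps_adaptive : (List (Int × Int)) × List (List (List Int)) :=
  ([(1, 1), (2, 2), (3, 1)], [[[1, 3], [2]], [[2]]])

def Spec_get_num_dpu_jumps_adaptive (mapping : List (Int × Int)) (set_traces : List (List (List Int))) (out : Int) : Prop := out = get_num_dpu_jumps_adaptive_alt mapping set_traces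
instance (mapping : List (Int × Int)) (set_traces : List (List (List Int))) (out : Int) : Decidable (Spec_get_num_dpu_jumps_adaptive mapping set_traces out) := by unfold Spec_get_num_dpu_jumps_adaptive; infer_instance

-- ===== CLAIM (what is proved, stated in full; the proofs are below) =====
def Claim_equal_get_num_dpu_jumps_adaptive : Prop := ∀ (mapping : List (Int × Int)) (set_traces : List (List (List Int))), Dom_get_num_dpu_jumps_adaptive mapping set_traces → Pre_get_num_dpu_jumps_adaptive mapping set_traces → Spec_get_num_dpu_jumps_adaptive mapping set_traces (get_num_dpu_jumps_adaptive mapping set_traces)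

-- ===== LEMMAS AND PROOFS =====

-- the common normal form of one set's contribution to a path:
-- the first-seen distinct DPUs, each replaced by its elements in list order
theorem pv_foldl_add_skip {α : Type} [BEq α] [LawfulBEq α] (x : α) :
    ∀ (xs acc : List α), x ∈ acc →
      xs.foldl PySem.Set.add acc = (xs.filter (fun y => !(y == x))).foldl PySem.Set.add acc := by
  intro xs
  induction xs with
  | nil => intro acc _; rfl
  | cons y ys ih =>
    intro acc hx
    by_cases h : y = x
    · subst h
      have hc : PySem.Set.add acc y = acc := by
        simp [PySem.Set.add, PySem.Set.contains, hx]
      simp only [List.foldl_cons, List.filter_cons, beq_self_eq_true, Bool.not_true,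
        Bool.false_eq_true, if_false, hc]
      exact ih acc hx
    · have hb : (y == x) = false := by simp [h]
      simp only [List.foldl_cons, List.filter_cons, hb, Bool.not_false, if_true]
      exact ih (PySem.Set.add acc y) ((PySem.Set.mem_add acc y x).mpr (Or.inl hx))

theorem pv_foldl_add_cons {α : Type} [BEq α] [LawfulBEq α] (x : α) :
    ∀ (xs acc : List α), (∀ y ∈ xs, ¬(y = x)) →
      xs.foldl PySem.Set.add (x :: acc) = x :: xs.foldl PySem.Set.add acc := by
  intro xs
  induction xs with
  | nil => intro acc _; rfl
  | cons y ys ih =>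
    intro acc h
    have hyx : (y == x) = false := by
      simpa using h y List.mem_cons_self
    have hstep : PySem.Set.add (x :: acc) y = x :: PySem.Set.add acc y := by
      simp only [PySem.Set.add, PySem.Set.contains, List.contains_cons, hyx, Bool.false_or]
      split <;> simp
    simp only [List.foldl_cons, hstep]
    exact ih (PySem.Set.add acc y) (fun z hz => h z (List.mem_cons_of_mem _ hz))

theorem pv_ofList_cons {α : Type} [BEq α] [LawfulBEq α] (x : α) (xs : List α) :
    PySem.Set.ofList (x :: xs) = x :: PySem.Set.ofList (xs.filter (fun y => !(y == x))) := by
  have h0 : PySem.Set.ofList (x :: xs) = xs.foldl PySem.Set.add [x] := by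
    simp [PySem.Set.ofList, PySem.Set.empty, PySem.Set.add, PySem.Set.contains]
  rw [h0, pv_foldl_add_skip x xs [x] (List.mem_singleton.mpr rfl)]
  exact pv_foldl_add_cons x _ [] (fun y hy => by
    have := List.of_mem_filter hy
    simpa using this)

theorem pv_whileA_eq (mapping : List (Int × Int)) (st : List Int) (hnd : st.Nodup) :
    ∀ (fuel : Nat) (q : Int → Bool) (rem : List Int),
      rem = st.filter (fun s => q (pvDget mapping s)) → rem.length ≤ fuel →
      pvWhileA mapping st fuel rem =
        (PySem.Set.ofList (rem.map (pvDget mapping))).flatMap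
          (fun d => st.filter (fun s => pvDget mapping s == d)) := by
  intro fuel
  induction fuel with
  | zero =>
    intro q rem hrem hlen
    have : rem = [] := List.eq_nil_of_length_eq_zero (Nat.le_zero.mp hlen)
    subst this
    simp [pvWhileA, PySem.Set.ofList, PySem.Set.empty]
  | succ n ih =>
    intro q rem hrem hlen
    cases rem with
    | nil => simp [pvWhileA, PySem.Set.ofList, PySem.Set.empty]
    | cons h t =>
      have hmem_rem : ∀ x ∈ h :: t, x ∈ st ∧ q (pvDget mapping x) = true := by
        intro x hx
        have : x ∈ st.filter (fun s => q (pvDget mapping s)) := hrem ▸ hx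
        exact ⟨(List.mem_filter.mp this).1, (List.mem_filter.mp this).2⟩
      have hfn : (st.filter (fun s => pvDget mapping s == pvDget mapping h)).Nodup := hnd.filter _
      have hinD : PySem.Set.ofList (st.filter (fun s => pvDget mapping s == pvDget mapping h))
          = st.filter (fun s => pvDget mapping s == pvDget mapping h) :=
        PySem.Set.ofList_eq_self_of_nodup _ hfn
      have hcong : ∀ x ∈ h :: t,
          (!(PySem.Set.contains (st.filter (fun s => pvDget mapping s == pvDget mapping h)) x))
            = (!(pvDget mapping x == pvDget mapping h)) := by
        intro x hx
        have hxst := (hmem_rem x hx).1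
        by_cases hcase : pvDget mapping x = pvDget mapping h
        · simp [PySem.Set.contains, List.mem_filter, hxst, hcase]
        · simp [PySem.Set.contains, List.mem_filter, hcase]
      have hht : (h :: t).filter (fun x => !(pvDget mapping x == pvDget mapping h))
          = t.filter (fun x => !(pvDget mapping x == pvDget mapping h)) := by
        simp
      have hdiff : PySem.Set.diff (h :: t)
            (PySem.Set.ofList (st.filter (fun s => pvDget mapping s == pvDget mapping h)))
          = t.filter (fun x => !(pvDget mapping x == pvDget mapping h)) := by
        rw [hinD]
        show (h :: t).filter
            (fun x => !(PySem.Set.contains (st.filter (fun s => pvDget mapping s == pvDget mapping h)) x)) = _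
        rw [List.filter_congr hcong, hht]
      have hq' : t.filter (fun x => !(pvDget mapping x == pvDget mapping h))
          = st.filter (fun s => (!(pvDget mapping s == pvDget mapping h)) && q (pvDget mapping s)) := by
        rw [← hht, hrem, List.filter_filter]
      have hlen' : (t.filter (fun x => !(pvDget mapping x == pvDget mapping h))).length ≤ n := by
        have h1 := List.length_filter_le (fun x => !(pvDget mapping x == pvDget mapping h)) t
        have h2 : t.length ≤ n := by simpa using Nat.succ_le_succ_iff.mp hlen
        omega
      have hrec := ih (fun d => (!(d == pvDget mapping h)) && q d)
        (t.filter (fun x => !(pvDget mapping x == pvDget mapping h))) hq' hlen'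
      have hmap2 : (t.filter (fun x => !(pvDget mapping x == pvDget mapping h))).map (pvDget mapping)
          = (t.map (pvDget mapping)).filter (fun y => !(y == pvDget mapping h)) := by
        rw [List.filter_map]
        rfl
      simp only [pvWhileA]
      rw [hdiff, hrec, hinD]
      have hmap : (h :: t).map (pvDget mapping) = pvDget mapping h :: t.map (pvDget mapping) := by simp
      rw [hmap, pv_ofList_cons, List.flatMap_cons, hmap2]

def pvCanon (mapping : List (Int × Int)) (st : List Int) : List Int :=
  (PySem.Set.ofList (st.map (pvDget mapping))).flatMap
    (fun d => st.filter (fun s => pvDget mapping s == d))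

theorem pv_whileA_canon (mapping : List (Int × Int)) (st : List Int) (hnd : st.Nodup) :
    pvWhileA mapping st st.length st = pvCanon mapping st := by
  have h := pv_whileA_eq mapping st hnd st.length (fun _ => true) st (by simp) le_rfl
  simpa [pvCanon] using h

theorem pv_groups_values (mapping : List (Int × Int)) (st : List Int) :
    (st.foldl (fun g s => g.modify (pvDget mapping s) [] (· ++ [s])) PySem.Dict.empty).values
      = (PySem.Set.ofList (st.map (pvDget mapping))).map
          (fun d => st.filter (fun s => pvDget mapping s == d)) := by
  set G := st.foldl (fun g s => g.modify (pvDget mapping s) [] (· ++ [s]))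
    (PySem.Dict.empty : PySem.Dict Int (List Int)) with hG
  have hkeys : G.keys = PySem.Set.ofList (st.map (pvDget mapping)) := by
    rw [hG]
    rw [PySem.Dict.keys_foldl_modify_key st (pvDget mapping) [] (fun _ s v => v ++ [s])]
    simp [PySem.Set.update_nil_left]
  have hnk : G.keys.Nodup := by
    rw [hG]
    exact PySem.Dict.nodup_keys_foldl_modify_key st (pvDget mapping) [] _ _ (by simp)
  have hget : ∀ k, G.getD k [] = st.filter (fun s => pvDget mapping s == k) := by
    intro k
    have hfold : G = (st.map (fun s => (pvDget mapping s, s))).foldl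
        (fun d p => d.modify p.1 [] (· ++ [p.2])) PySem.Dict.empty := by
      rw [hG, List.foldl_map]
    rw [hfold, PySem.Dict.getD_foldl_modify_append]
    simp [List.filter_map, Function.comp_def]
  rw [PySem.Dict.values_eq_map_keys G hnk [], hkeys]
  exact List.map_congr_left (fun d _ => hget d)

theorem pv_edges_zip (p : List Int) :
    (PySem.List.pyRange 0 ((p.length : Int) - 1) 1).map
        (fun i => (PySem.List.pyGetD p i 0, PySem.List.pyGetD p (i + 1) 0))
      = p.zip p.tail := by
  rw [PySem.List.pyRange_one]
  have hlen : ((p.length : Int) - 1 - 0).toNat = p.length - 1 := by omega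
  rw [hlen, List.map_map]
  apply List.ext_getElem
  · simp [List.length_zip, List.length_tail]
  · intro i h1 h2
    have hi : i < p.length - 1 := by simpa using h1
    have hip : i < p.length := by omega
    have hip1 : i + 1 < p.length := by omega
    simp only [List.getElem_map, List.getElem_range, Function.comp_apply, List.getElem_zip,
      List.getElem_tail]
    have e1 : PySem.List.pyGetD p ((0 : Int) + (i : Int)) 0 = p[i] := by
      rw [show ((0 : Int) + (i : Int)) = ((i : Nat) : Int) by omega]
      rw [PySem.List.pyGetD_natCast]
      simp [List.getD_eq_getElem?_getD, hip]
    have e2 : PySem.List.pyGetD p ((0 : Int) + (i : Int) + 1) 0 = p[i + 1] := by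
      rw [show ((0 : Int) + (i : Int) + 1) = (((i + 1 : Nat)) : Int) by omega]
      rw [PySem.List.pyGetD_natCast]
      simp [List.getD_eq_getElem?_getD, hip1]
    rw [e1, e2]

theorem pv_final (mapping : List (Int × Int)) (set_traces : List (List (List Int)))
    (hnd : ∀ tr ∈ set_traces, ∀ st ∈ tr, st.Nodup) :
    get_num_dpu_jumps_adaptive mapping set_traces
      = get_num_dpu_jumps_adaptive_alt mapping set_traces := by
  -- A's per-trace path
  have hApath : ∀ tr ∈ set_traces,
      tr.foldl (fun path elements => path ++ pvWhileA mapping elements elements.length elements) []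
        = tr.flatMap (pvCanon mapping) := by
    intro tr htr
    rw [PySem.List.foldl_congr_mem tr _ (fun path st => path ++ pvCanon mapping st) []
      (fun acc st hst => by rw [pv_whileA_canon mapping st (hnd tr htr st hst)])]
    exact PySem.List.foldl_append_eq_flatMap _ _ []
  -- B's per-trace path
  have hBpath : ∀ tr : List (List Int),
      tr.foldl (fun path elements =>
        (elements.foldl (fun g s => g.modify (pvDget mapping s) [] (· ++ [s]))
          PySem.Dict.empty).values.foldl (fun p grp => p ++ grp) path) []
        = tr.flatMap (pvCanon mapping) := by
    intro tr
    rw [PySem.List.foldl_congr_mem tr _ (fun path st => path ++ pvCanon mapping st) []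
      (fun acc st _ => by
        rw [PySem.List.foldl_append_eq_flatten, pv_groups_values, ← List.flatMap_def]
        rfl)]
    exact PySem.List.foldl_append_eq_flatMap _ _ []
  -- A's edge list from one path
  have hedges : ∀ (p : List Int) (acc : List (Int × Int)),
      (PySem.List.pyRange 0 ((p.length : Int) - 1) 1).foldl (fun es i =>
        es ++ [(PySem.List.pyGetD p i 0, PySem.List.pyGetD p (i + 1) 0)]) acc
        = acc ++ p.zip p.tail := by
    intro p acc
    rw [PySem.List.foldl_append_singleton_eq_map
      (fun i => (PySem.List.pyGetD p i 0, PySem.List.pyGetD p (i + 1) 0)), pv_edges_zip]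
  -- assemble side A
  show ((((set_traces.foldl (fun paths set_trace =>
        paths ++ [set_trace.foldl (fun path elements =>
          path ++ pvWhileA mapping elements elements.length elements) []]) []).foldl
      (fun es path => (PySem.List.pyRange 0 ((path.length : Int) - 1) 1).foldl (fun es i =>
        es ++ [(PySem.List.pyGetD path i 0, PySem.List.pyGetD path (i + 1) 0)]) es) []).filter
      (fun e => !(pvDget mapping e.1 == pvDget mapping e.2))).length : Int) = _
  rw [PySem.List.foldl_append_singleton_eq_map
    (fun set_trace => set_trace.foldl (fun path elements =>
      path ++ pvWhileA mapping elements elements.length elements) []) set_traces []]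
  rw [List.map_congr_left hApath]
  rw [PySem.List.foldl_congr_mem _ _ (fun es p => es ++ p.zip p.tail) []
    (fun acc p _ => hedges p acc)]
  rw [PySem.List.foldl_append_eq_flatMap (fun p : List Int => p.zip p.tail)
    ([] ++ List.map (List.flatMap (pvCanon mapping)) set_traces) []]
  rw [List.nil_append, List.nil_append, List.flatMap_map, List.filter_flatMap, List.length_flatMap]
  -- assemble side B
  unfold get_num_dpu_jumps_adaptive_alt
  simp only [hBpath, List.drop_one]
  have hcount : ∀ (jumps : Int) (z : List (Int × Int)),
      z.foldl (fun jumps e =>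
        if pvDget mapping e.1 ≠ pvDget mapping e.2 then jumps + 1 else jumps) jumps
      = jumps + ((z.filter (fun e => !(pvDget mapping e.1 == pvDget mapping e.2))).length : Int) := by
    intro jumps z
    rw [PySem.List.foldl_congr_mem z _ (fun j e =>
        if (!(pvDget mapping e.1 == pvDget mapping e.2)) = true then j + 1 else j) jumps
      (fun j e _ => by by_cases h : pvDget mapping e.1 = pvDget mapping e.2 <;> simp [h])]
    rw [PySem.List.foldl_count_if, List.countP_eq_length_filter]
  simp only [hcount]
  rw [PySem.List.foldl_add set_traces (fun tr =>
    (((tr.flatMap (pvCanon mapping)).zip (tr.flatMap (pvCanon mapping)).tail).filter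
      (fun e => !(pvDget mapping e.1 == pvDget mapping e.2))).length) 0]
  rw [zero_add, Nat.cast_list_sum, List.map_map]
  rfl

-- ===== VERDICT (by name: the statement is the Claim_ definition above) =====
theorem get_num_dpu_jumps_adaptive_spec : Claim_equal_get_num_dpu_jumps_adaptive := by
  intro mapping set_traces _ hpre
  unfold Spec_get_num_dpu_jumps_adaptive
  exact pv_final mapping set_traces (fun tr htr st hst => ((hpre tr htr).1 st hst).1)
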